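-- pv_equiv track=rewrite | github.com/mondrasovic/competitive_programming | UVA/850_Crypt_Kicker/main.py | find_valid_encryption_schema
-- ===== SOURCE A (Python) =====
-- def find_valid_encryption_schema(line, known_line):
--     encryption_schema = {}
--     used_dst_letters = set()
--
--     for src_letter, dst_letter in zip(line, known_line):
--         if (src_letter == ' ') and (dst_letter == ' '):
--             continue
--
--         if src_letter in encryption_schema:
--             if dst_letter == encryption_schema[src_letter]:
--                 continue
--             else:
--                 return None
--         else:
--             if dst_letter in used_dst_letters:
--                 return None
--
--         encryption_schema[src_letter] = dst_letter
--         used_dst_letters.add(dst_letter)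
--
--     return encryption_schema
-- ===== SOURCE B (Python) =====
-- def find_valid_encryption_schema(line, known_line):
--     # Counting approach: the filtered pair relation is a valid schema iff it is an
--     # injective function, i.e. #distinct pairs == #distinct sources == #distinct targets.
--     pairs = [(s, d) for s, d in zip(line, known_line) if s != ' ' or d != ' ']
--     distinct = set(pairs)
--     if len(distinct) != len({s for s, _ in pairs}) or len(distinct) != len({d for _, d in pairs}):
--         return None
--     return dict(pairs)
-- ===== Notes on version B (the rewrite author's own statement) =====
-- stated objective: alternative
-- what changed: B replaces A's incremental conflict detection (dict + used-destination set with early returns) by a global counting criterion: filter the zipped pairs once, then the mapping is valid iff the number of distinct pairs equals the number of distinct sources and the number of distinct targets, after which the dict is built unconditionally from the pair list.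
import Mathlib
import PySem

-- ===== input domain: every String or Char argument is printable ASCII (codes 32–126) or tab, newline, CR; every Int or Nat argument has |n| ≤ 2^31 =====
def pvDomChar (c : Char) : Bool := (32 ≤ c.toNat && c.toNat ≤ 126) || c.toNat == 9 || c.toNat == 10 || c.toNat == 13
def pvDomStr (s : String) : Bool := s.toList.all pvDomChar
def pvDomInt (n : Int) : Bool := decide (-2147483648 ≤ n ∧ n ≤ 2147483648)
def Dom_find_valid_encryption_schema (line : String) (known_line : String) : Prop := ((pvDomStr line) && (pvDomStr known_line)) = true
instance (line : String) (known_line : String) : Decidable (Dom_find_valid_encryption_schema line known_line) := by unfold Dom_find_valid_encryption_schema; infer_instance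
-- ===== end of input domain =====

-- B replaces A's incremental conflict detection by a global counting criterion: the filtered
-- pair relation is a valid schema iff #distinct pairs = #distinct sources = #distinct targets,
-- after which the dict is built unconditionally (alternative algorithm, same O(n) cost).

-- ===== PORT A =====
-- the dict's 1-character-string keys/values are carried as Chars; rendered as Strings at the end
def pvToStrPair (p : Char × Char) : String × String := (String.singleton p.1, String.singleton p.2)

def pvLoopA : List (Char × Char) → PySem.Dict Char Char → PySem.Set Char → Option (PySem.Dict Char Char)
  | [], schema, _ => some schema
  | (src, dst) :: rest, schema, used =>
    if src = ' ' ∧ dst = ' ' then pvLoopA rest schema used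
    else if schema.contains src then
      match schema.get? src with
      | some v => if dst = v then pvLoopA rest schema used else none
      | none => none   -- unreachable: contains src
    else if PySem.Set.contains used dst then none
    else pvLoopA rest (schema.insert src dst) (PySem.Set.add used dst)

def find_valid_encryption_schema (line : String) (known_line : String) : Option (List (String × String)) :=
  (pvLoopA (line.toList.zip known_line.toList) PySem.Dict.empty PySem.Set.empty).map
    (fun d => d.items.map pvToStrPair)

-- ===== PORT B =====
def find_valid_encryption_schema_alt (line : String) (known_line : String) : Option (List (String × String)) :=
  let pairs := (line.toList.zip known_line.toList).filter (fun p => p.1 != ' ' || p.2 != ' ')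
  let distinct := PySem.Set.ofList pairs
  if distinct.length ≠ (PySem.Set.ofList (pairs.map Prod.fst)).length ∨
     distinct.length ≠ (PySem.Set.ofList (pairs.map Prod.snd)).length then none
  else some ((PySem.Dict.ofList pairs).items.map pvToStrPair)

-- ===== PRECONDITION & SPEC =====
def Spec_find_valid_encryption_schema (line : String) (known_line : String) (out : Option (List (String × String))) : Prop := out = find_valid_encryption_schema_alt line known_line
instance (line : String) (known_line : String) (out : Option (List (String × String))) : Decidable (Spec_find_valid_encryption_schema line known_line out) := by unfold Spec_find_valid_encryption_schema; infer_instance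

-- ===== CLAIM (what is proved, stated in full; the proofs are below) =====
def Claim_equal_find_valid_encryption_schema : Prop := ∀ (line : String) (known_line : String), Dom_find_valid_encryption_schema line known_line → Spec_find_valid_encryption_schema line known_line (find_valid_encryption_schema line known_line)

-- ===== LEMMAS AND PROOFS =====

-- the compatibility relation: two pairs can live in one injective function
abbrev pvRel (p q : Char × Char) : Prop := p.1 = q.1 ↔ p.2 = q.2

lemma pv_rel_symm : Symmetric pvRel :=
  fun _ _ h => ⟨fun e => (h.mp e.symm).symm, fun e => (h.mpr e.symm).symm⟩

-- pairwise compatibility gives compatibility of ANY two members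
lemma pv_rel_of_pairwise {l : List (Char × Char)} (h : l.Pairwise pvRel)
    {a b : Char × Char} (ha : a ∈ l) (hb : b ∈ l) : pvRel a b := by
  by_cases hab : a = b
  · subst hab; exact ⟨fun _ => rfl, fun _ => rfl⟩
  · exact List.Pairwise.forall pv_rel_symm h ha hb hab

-- A's loop ignores the both-space pairs: filtering them out first changes nothing
lemma pv_loopA_filter (ps : List (Char × Char)) (d : PySem.Dict Char Char) (u : PySem.Set Char) :
    pvLoopA ps d u = pvLoopA (ps.filter (fun p => p.1 != ' ' || p.2 != ' ')) d u := by
  induction ps generalizing d u with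
  | nil => rfl
  | cons p rest ih =>
    obtain ⟨s, t⟩ := p
    by_cases hs : s = ' ' ∧ t = ' '
    · obtain ⟨h1, h2⟩ := hs
      subst h1; subst h2
      simpa [pvLoopA] using ih d u
    · have hb : ((s, t).1 != ' ' || (s, t).2 != ' ') = true := by
        simp only [bne_iff_ne, Bool.or_eq_true, ne_eq]
        tauto
      simp only [List.filter_cons, hb, if_true]
      simp only [pvLoopA, if_neg hs]
      split
      · split
        · split
          · exact ih d u
          · rfl
        · rfl
      · split
        · rfl
        · exact ih _ _

-- overwriting a key with the value it already has does not change the dict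
lemma pv_insert_same (d : PySem.Dict Char Char) (k v : Char)
    (hk : d.keys.Nodup) (hg : d.get? k = some v) : d.insert k v = d := by
  have hc : d.contains k = true := by rw [PySem.Dict.contains_eq_isSome_get?, hg]; rfl
  apply PySem.Dict.ext
  rw [PySem.Dict.items_insert_of_contains d v hc]
  conv_rhs => rw [← List.map_id d.items]
  apply List.map_congr_left
  intro p hp
  obtain ⟨p1, p2⟩ := p
  by_cases hpk : p1 = k
  · subst hpk
    have : d.get? p1 = some p2 := PySem.Dict.get?_of_mem_items d hp hk
    rw [hg] at this
    simp [Option.some_inj.mp this]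
  · simp [hpk]

-- inserting a fresh key appends its value to the values list
lemma pv_values_insert (d : PySem.Dict Char Char) (src dst : Char)
    (hc : d.contains src = false) :
    (d.insert src dst).values = d.values ++ [dst] := by
  simp only [PySem.Dict.values, PySem.Dict.items_insert_of_not_contains d dst hc,
    List.map_append, List.map_cons, List.map_nil]

-- with no both-space pairs left, A's loop succeeds exactly when the accumulated pair list is
-- pairwise compatible, and then returns the fold of inserts
lemma pv_main (ps : List (Char × Char)) (d : PySem.Dict Char Char)
    (hns : ∀ p ∈ ps, ¬(p.1 = ' ' ∧ p.2 = ' '))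
    (hk : d.keys.Nodup) (hp : d.items.Pairwise pvRel) :
    pvLoopA ps d (PySem.Set.ofList d.values) =
      if (d.items ++ ps).Pairwise pvRel then
        some (ps.foldl (fun d p => d.insert p.1 p.2) d) else none := by
  induction ps generalizing d with
  | nil => simp [pvLoopA, hp]
  | cons p rest ih =>
    obtain ⟨s, t⟩ := p
    have hs : ¬(s = ' ' ∧ t = ' ') := hns (s, t) (by simp)
    have hns' : ∀ p ∈ rest, ¬(p.1 = ' ' ∧ p.2 = ' ') := fun p hp' => hns p (List.mem_cons_of_mem _ hp')
    -- key injectivity from keys-nodup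
    have ki : ∀ a ∈ d.items, ∀ b ∈ d.items, a.1 = b.1 → a = b := by
      intro a ha b hb hfst
      exact List.inj_on_of_nodup_map hk ha hb hfst
    cases hg : d.get? s with
    | some prev =>
      have hc : d.contains s = true := by rw [PySem.Dict.contains_eq_isSome_get?, hg]; rfl
      have hmem : (s, prev) ∈ d.items := PySem.Dict.mem_items_of_get?_eq_some d hg
      by_cases he : t = prev
      · subst he
        rw [show pvLoopA ((s, t) :: rest) d (PySem.Set.ofList d.values)
              = pvLoopA rest d (PySem.Set.ofList d.values) from by
            simp [pvLoopA, hs, hc, hg]]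
        rw [ih d hns' hk hp]
        have hcond : (d.items ++ (s, t) :: rest).Pairwise pvRel ↔ (d.items ++ rest).Pairwise pvRel := by
          constructor
          · exact fun h => h.sublist (List.Sublist.append_left (List.sublist_cons_self _ _) _)
          · intro h
            rw [List.pairwise_append] at h ⊢
            obtain ⟨h1, h2, h3⟩ := h
            refine ⟨h1, List.Pairwise.cons (fun b hb => h3 _ hmem _ hb) h2, ?_⟩
            intro a ha b hb
            rcases List.mem_cons.mp hb with hb | hb
            · subst hb; exact pv_rel_of_pairwise h1 ha hmem
            · exact h3 a ha b hb
        by_cases hP : (d.items ++ rest).Pairwise pvRel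
        · rw [if_pos hP, if_pos (hcond.mpr hP)]
          simp only [List.foldl_cons]
          rw [pv_insert_same d s t hk hg]
        · rw [if_neg hP, if_neg (fun h => hP (hcond.mp h))]
      · rw [show pvLoopA ((s, t) :: rest) d (PySem.Set.ofList d.values) = none from by
            simp [pvLoopA, hs, hc, hg, he]]
        rw [if_neg]
        intro h
        rw [List.pairwise_append] at h
        have := h.2.2 _ hmem (s, t) (by simp)
        exact he (this.mp rfl).symm
    | none =>
      have hc : d.contains s = false := by rw [PySem.Dict.contains_eq_isSome_get?, hg]; rfl
      by_cases hv : t ∈ d.values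
      · -- destination already used by another source: A rejects, and compatibility fails
        rw [show pvLoopA ((s, t) :: rest) d (PySem.Set.ofList d.values) = none from by
            simp only [pvLoopA, if_neg hs, hc, Bool.false_eq_true, if_false]
            rw [if_pos (by rw [PySem.Set.contains_iff, PySem.Set.mem_ofList]; exact hv)]]
        rw [if_neg]
        intro h
        obtain ⟨⟨q1, q2⟩, hq, hqt⟩ := List.mem_map.mp hv
        have hqs : q1 ≠ s := by
          intro e
          subst e
          have : d.get? q1 = some q2 := PySem.Dict.get?_of_mem_items d hq hk
          rw [hg] at this
          simp at this
        rw [List.pairwise_append] at h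
        exact hqs ((h.2.2 _ hq (s, t) (by simp)).mpr hqt)
      · -- fresh source, fresh destination: insert and recurse
        have hcd : (PySem.Set.ofList d.values).contains t = false := by
          rw [← Bool.not_eq_true, PySem.Set.contains_iff, PySem.Set.mem_ofList]; exact hv
        rw [show pvLoopA ((s, t) :: rest) d (PySem.Set.ofList d.values)
              = pvLoopA rest (d.insert s t)
                  (PySem.Set.add (PySem.Set.ofList d.values) t) from by
            simp only [pvLoopA, if_neg hs, hc, Bool.false_eq_true, if_false, hcd]]
        have hvals := pv_values_insert d s t hc
        have hset : PySem.Set.add (PySem.Set.ofList d.values) t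
            = PySem.Set.ofList ((d.insert s t).values) := by
          rw [hvals, PySem.Set.ofList_append_singleton]
        have hitems : (d.insert s t).items = d.items ++ [(s, t)] :=
          PySem.Dict.items_insert_of_not_contains d t hc
        have hrel : ∀ a ∈ d.items, pvRel a (s, t) := by
          intro a ha
          obtain ⟨a1, a2⟩ := a
          constructor
          · intro e
            exfalso
            have e' : a1 = s := e
            have : d.get? a1 = some a2 := PySem.Dict.get?_of_mem_items d ha hk
            rw [e', hg] at this
            simp at this
          · intro e
            exfalso
            exact hv (List.mem_map.mpr ⟨(a1, a2), ha, e⟩)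
        have hk' : (d.insert s t).keys.Nodup := PySem.Dict.nodup_keys_insert d s t hk
        have hp' : (d.insert s t).items.Pairwise pvRel := by
          rw [hitems, List.pairwise_append]
          exact ⟨hp, List.pairwise_singleton _ _, fun a ha b hb => by
            rw [List.mem_singleton.mp hb]; exact hrel a ha⟩
        rw [hset, ih (d.insert s t) hns' hk' hp']
        rw [show d.items ++ (s, t) :: rest = (d.insert s t).items ++ rest from by
          rw [hitems, List.append_assoc]; rfl]
        rfl

-- |set(xs)| is the Finset cardinality of xs's members
lemma pv_len_ofList_card {α : Type} [DecidableEq α] [BEq α] [LawfulBEq α] (xs : List α) :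
    (PySem.Set.ofList xs).length = xs.toFinset.card := by
  rw [← List.toFinset_card_of_nodup (PySem.Set.nodup_ofList xs)]
  congr 1
  apply Finset.ext
  intro a
  simp [PySem.Set.mem_ofList]

-- B's counting test is exactly pairwise compatibility of the pair list
lemma pv_count_iff (pairs : List (Char × Char)) :
    ((PySem.Set.ofList pairs).length = (PySem.Set.ofList (pairs.map Prod.fst)).length ∧
     (PySem.Set.ofList pairs).length = (PySem.Set.ofList (pairs.map Prod.snd)).length)
      ↔ pairs.Pairwise pvRel := by
  have himg : ∀ (f : Char × Char → Char),
      (pairs.map f).toFinset = pairs.toFinset.image f := by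
    intro f; apply Finset.ext; intro a; simp
  rw [pv_len_ofList_card, pv_len_ofList_card, pv_len_ofList_card, himg, himg]
  rw [eq_comm (b := (pairs.toFinset.image Prod.fst).card),
      eq_comm (b := (pairs.toFinset.image Prod.snd).card),
      Finset.card_image_iff, Finset.card_image_iff]
  constructor
  · intro ⟨h1, h2⟩
    apply List.pairwise_of_forall_mem_list
    intro a ha b hb
    constructor
    · intro e
      have : a = b := h1 (by simp [ha]) (by simp [hb]) e
      rw [this]
    · intro e
      have : a = b := h2 (by simp [ha]) (by simp [hb]) e
      rw [this]
  · intro h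
    constructor
    · intro a ha b hb e
      have ha' : a ∈ pairs := by simpa using ha
      have hb' : b ∈ pairs := by simpa using hb
      have := (pv_rel_of_pairwise h ha' hb').mp e
      exact Prod.ext e this
    · intro a ha b hb e
      have ha' : a ∈ pairs := by simpa using ha
      have hb' : b ∈ pairs := by simpa using hb
      have := (pv_rel_of_pairwise h ha' hb').mpr e
      exact Prod.ext this e

-- ===== VERDICT (by name: the statement is the Claim_ definition above) =====
theorem find_valid_encryption_schema_spec : Claim_equal_find_valid_encryption_schema := by
  intro line known_line _
  unfold Spec_find_valid_encryption_schema find_valid_encryption_schema find_valid_encryption_schema_alt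
  set pairs := (line.toList.zip known_line.toList).filter (fun p => p.1 != ' ' || p.2 != ' ') with hpairs
  rw [pv_loopA_filter, ← hpairs]
  have hns : ∀ p ∈ pairs, ¬(p.1 = ' ' ∧ p.2 = ' ') := by
    intro p hp
    have := List.of_mem_filter hp
    simp only [bne_iff_ne, Bool.or_eq_true, ne_eq] at this
    tauto
  have h := pv_main pairs PySem.Dict.empty hns List.nodup_nil List.Pairwise.nil
  rw [show PySem.Set.ofList (PySem.Dict.empty : PySem.Dict Char Char).values
        = PySem.Set.empty from rfl] at h
  rw [h]
  by_cases hP : pairs.Pairwise pvRel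
  · have hc := (pv_count_iff pairs).mpr hP
    rw [if_pos (by simpa using hP), if_neg (by simp only [ne_eq, not_or, not_not]; exact hc)]
    rfl
  · have hc := fun h' => hP ((pv_count_iff pairs).mp h')
    rw [if_neg (by simpa using hP), if_pos (by
      by_contra hcon
      simp only [ne_eq, not_or, not_not] at hcon
      exact hc hcon)]
    rfl
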